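-- pv_equiv track=rewrite | github.com/Hyphern/Rummikub | Rummikub-Carden/testing_files/worm/redundant/main.py | count_group_options
-- ===== SOURCE A (Python) =====
-- from itertools import combinations
--
-- def count_group_options(board, row, col):
--     """Count how many groups this tile can participate in."""
--     available = [r for r in range(4) if board[r][col] > 0]
--     if len(available) < 3:
--         return 0
--
--     count = 0
--     for size in range(3, len(available) + 1):
--         for combo in combinations(available, size):
--             if row in combo:
--                 count += 1
--     return count
-- ===== SOURCE B (Python) =====
-- def _comb(n, k):
--     """Binomial coefficient via the multiplicative formula."""
--     if k < 0 or k > n: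
--         return 0
--     r = 1
--     for i in range(k):
--         r = r * (n - i) // (i + 1)
--     return r
--
--
-- def count_group_options(board, row, col):
--     """Count how many groups this tile can participate in."""
--     available = [r for r in range(4) if board[r][col] > 0]
--     if row not in available:
--         return 0
--     n = len(available)
--     return sum(_comb(n - 1, size - 1) for size in range(3, n + 1))
-- ===== Notes on version B (the rewrite author's own statement) =====
-- stated objective: simpler
-- what changed: Replaces the enumeration of all size>=3 combinations of the available rows (and membership test of row in each) with the closed-form count sum_{size=3..n} C(n-1, size-1) of subsets containing row, guarded by a single membership test.
import Mathlib
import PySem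

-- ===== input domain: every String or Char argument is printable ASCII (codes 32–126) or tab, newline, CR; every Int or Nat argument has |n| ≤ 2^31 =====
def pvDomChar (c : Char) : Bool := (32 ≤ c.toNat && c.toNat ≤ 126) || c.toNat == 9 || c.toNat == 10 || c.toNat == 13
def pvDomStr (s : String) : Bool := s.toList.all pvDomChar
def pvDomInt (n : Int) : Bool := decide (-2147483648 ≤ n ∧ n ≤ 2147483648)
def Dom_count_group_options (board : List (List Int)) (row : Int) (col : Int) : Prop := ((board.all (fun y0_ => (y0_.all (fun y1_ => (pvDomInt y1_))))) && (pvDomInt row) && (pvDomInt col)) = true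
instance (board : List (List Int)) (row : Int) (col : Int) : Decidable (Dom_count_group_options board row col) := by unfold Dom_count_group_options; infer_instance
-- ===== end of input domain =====

-- B replaces A's enumeration of all size-≥3 combinations by the closed-form count Σ C(n-1,size-1); simpler, same values.

-- ===== PORT A =====
-- itertools.combinations, in itertools' output order (exact for distinct elements; membership tests only look at the set of elements)
def pvCombos : Nat → List Int → List (List Int)
  | 0, _ => [[]]
  | _ + 1, [] => []
  | k + 1, a :: as => (pvCombos k as).map (a :: ·) ++ pvCombos (k + 1) as

def count_group_options (board : List (List Int)) (row : Int) (col : Int) : Int :=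
  let available := (PySem.List.pyRange 0 4 1).filter
    (fun r => decide (0 < PySem.List.pyGetD (PySem.List.pyGetD board r []) col 0))
  if available.length < 3 then 0
  else
    (PySem.List.pyRange 3 ((available.length : Int) + 1) 1).foldl
      (fun count size =>
        (pvCombos size.toNat available).foldl
          (fun count combo => if row ∈ combo then count + 1 else count) count) 0

-- ===== PORT B =====
-- binomial coefficient by the multiplicative formula, as in Source B's _comb
def pvComb (n k : Int) : Int :=
  if k < 0 ∨ n < k then 0
  else (PySem.List.pyRange 0 k 1).foldl
    (fun r i => PySem.Int.floordiv (r * (n - i)) (i + 1)) 1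

def count_group_options_alt (board : List (List Int)) (row : Int) (col : Int) : Int :=
  let available := (PySem.List.pyRange 0 4 1).filter
    (fun r => decide (0 < PySem.List.pyGetD (PySem.List.pyGetD board r []) col 0))
  if row ∈ available then
    (PySem.List.pyRange 3 ((available.length : Int) + 1) 1).foldl
      (fun s size => s + pvComb ((available.length : Int) - 1) (size - 1)) 0
  else 0

-- ===== PRECONDITION & SPEC =====
-- Pre_ excludes exactly the inputs where Python A raises an IndexError:
-- fewer than 4 rows, or col out of range (Python negative-index rule) for one of the first 4 rows.
def Pre_count_group_options (board : List (List Int)) (row : Int) (col : Int) : Prop :=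
  4 ≤ board.length ∧ ∀ l ∈ board.take 4, PySem.Raise.InRange l.length col
instance (board : List (List Int)) (row : Int) (col : Int) : Decidable (Pre_count_group_options board row col) := by unfold Pre_count_group_options; infer_instance

def pvWitness_count_group_options : List (List Int) × Int × Int := ([[1], [2], [0], [3]], 0, 0)

def Spec_count_group_options (board : List (List Int)) (row : Int) (col : Int) (out : Int) : Prop := out = count_group_options_alt board row col
instance (board : List (List Int)) (row : Int) (col : Int) (out : Int) : Decidable (Spec_count_group_options board row col out) := by unfold Spec_count_group_options; infer_instance

-- ===== CLAIM (what is proved, stated in full; the proofs are below) =====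
def Claim_equal_count_group_options : Prop := ∀ (board : List (List Int)) (row : Int) (col : Int), Dom_count_group_options board row col → Pre_count_group_options board row col → Spec_count_group_options board row col (count_group_options board row col)

-- ===== LEMMAS AND PROOFS =====

lemma pvCombos_length (k : Nat) (l : List Int) : (pvCombos k l).length = l.length.choose k := by
  induction l generalizing k with
  | nil => cases k <;> simp [pvCombos]
  | cons a as ih =>
    cases k with
    | zero => simp [pvCombos]
    | succ j => simp [pvCombos, ih, Nat.choose_succ_succ]

lemma countP_pvCombos (x : Int) (l : List Int) (hl : l.Nodup) (k : Nat) :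
    ((pvCombos (k + 1) l).countP (fun c => decide (x ∈ c)) : Nat)
      = if x ∈ l then l.length.pred.choose k else 0 := by
  induction l generalizing k with
  | nil => simp [pvCombos]
  | cons a as ih =>
    have has : as.Nodup := hl.of_cons
    have hax : a ∉ as := (List.nodup_cons.mp hl).1
    simp only [pvCombos, List.countP_append, List.countP_map]
    by_cases hx : x = a
    · subst hx
      have h1 : (List.countP ((fun c => decide (x ∈ c)) ∘ (x :: ·)) (pvCombos k as))
          = (pvCombos k as).length := by
        apply List.countP_eq_length.mpr; intro c _; simp
      have h2 : (pvCombos (k + 1) as).countP (fun c => decide (x ∈ c)) = 0 := by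
        cases k with
        | zero =>
          rw [ih has 0]; simp [hax]
        | succ j =>
          rw [ih has (j + 1)]; simp [hax]
      rw [h1, h2, pvCombos_length]
      simp
    · have hcomp : ((fun c => decide (x ∈ c)) ∘ (a :: ·)) = fun c => decide (x ∈ c) := by
        funext c; simp [hx]
      rw [hcomp, ih has k]
      by_cases hxs : x ∈ as
      · obtain ⟨m, hm⟩ : ∃ m, as.length = m + 1 := by
          cases as with
          | nil => simp at hxs
          | cons b bs => exact ⟨bs.length, by simp⟩
        cases k with
        | zero =>
          have h0 : (pvCombos 0 as).countP (fun c => decide (x ∈ c)) = 0 := by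
            simp [pvCombos]
          rw [h0]
          simp [hxs, hx, hm]
        | succ j =>
          rw [ih has j]
          simp [hxs, hx, hm, Nat.choose_succ_succ, Nat.add_comm]
      · have h0 : ∀ k', (pvCombos k' as).countP (fun c => decide (x ∈ c)) = 0 := by
          intro k'
          apply List.countP_eq_zero.mpr
          intro c hc
          simp only [decide_eq_true_eq]
          intro hxc
          -- every element of a combination of as is in as
          have : ∀ k' (l' : List Int) c, c ∈ pvCombos k' l' → ∀ y ∈ c, y ∈ l' := by
            intro k' l'
            induction l' generalizing k' with
            | nil => intro c hc y hy; cases k' <;> simp_all [pvCombos]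
            | cons b bs ihb =>
              intro c hc y hy
              cases k' with
              | zero => simp [pvCombos] at hc; subst hc; simp at hy
              | succ j =>
                simp only [pvCombos, List.mem_append, List.mem_map] at hc
                rcases hc with ⟨c', hc', rfl⟩ | hc'
                · rcases List.mem_cons.mp hy with rfl | hy'
                  · simp
                  · exact List.mem_cons_of_mem _ (ihb j c' hc' y hy')
                · exact List.mem_cons_of_mem _ (ihb (j + 1) c hc' y hy)
          exact hxs (this _ _ _ hc x hxc)
        rw [h0 k]
        simp [hxs, hx]

-- the inner combo loop is a countP
lemma inner_loop_eq (row : Int) (l : List Int) (acc : Int) (k : Nat) :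
    (pvCombos k l).foldl (fun count combo => if row ∈ combo then count + 1 else count) acc
      = acc + ((pvCombos k l).countP (fun c => decide (row ∈ c)) : Int) :=
  PySem.List.foldl_ite_add_one _ _ _

theorem count_group_options_spec_aux (board : List (List Int)) (row : Int) (col : Int) :
    count_group_options board row col = count_group_options_alt board row col := by
  simp only [count_group_options, count_group_options_alt]
  set available := (PySem.List.pyRange 0 4 1).filter
    (fun r => decide (0 < PySem.List.pyGetD (PySem.List.pyGetD board r []) col 0)) with havail
  have hnd : available.Nodup := (PySem.List.nodup_pyRange_one 0 4).filter _
  have hlen : available.length ≤ 4 := by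
    have := List.length_filter_le
      (fun r => decide (0 < PySem.List.pyGetD (PySem.List.pyGetD board r []) col 0))
      (PySem.List.pyRange 0 4 1)
    simpa [havail] using this
  have hcases : available.length = 0 ∨ available.length = 1 ∨ available.length = 2 ∨
      available.length = 3 ∨ available.length = 4 := by omega
  by_cases hmem : row ∈ available
  · rcases hcases with h | h | h | h | h <;> rw [h] <;> norm_num
    · -- n = 3
      have hr : PySem.List.pyRange 3 4 1 = [3] := by decide
      rw [hr]
      simp only [List.foldl_cons, List.foldl_nil]
      rw [inner_loop_eq]
      have := countP_pvCombos row available hnd 2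
      rw [if_pos hmem, h] at this
      rw [show ((3:Int).toNat) = 2 + 1 from rfl, this]
      simp [hmem]
      decide
    · -- n = 4
      have hr : PySem.List.pyRange 3 5 1 = [3, 4] := by decide
      rw [hr]
      simp only [List.foldl_cons, List.foldl_nil]
      rw [inner_loop_eq, inner_loop_eq]
      have h3 := countP_pvCombos row available hnd 2
      have h4 := countP_pvCombos row available hnd 3
      rw [if_pos hmem, h] at h3 h4
      rw [show ((3:Int).toNat) = 2 + 1 from rfl, show ((4:Int).toNat) = 3 + 1 from rfl, h3, h4]
      simp [hmem]
      decide
  · -- row not available: A's count sums countP's that are all 0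
    rw [if_neg hmem]
    rcases hcases with h | h | h | h | h <;> rw [h] <;> norm_num
    · have hr : PySem.List.pyRange 3 4 1 = [3] := by decide
      rw [hr]
      simp only [List.foldl_cons, List.foldl_nil]
      rw [inner_loop_eq]
      have := countP_pvCombos row available hnd 2
      rw [if_neg hmem] at this
      rw [show ((3:Int).toNat) = 2 + 1 from rfl, this]
      simp
    · have hr : PySem.List.pyRange 3 5 1 = [3, 4] := by decide
      rw [hr]
      simp only [List.foldl_cons, List.foldl_nil]
      rw [inner_loop_eq, inner_loop_eq]
      have h3 := countP_pvCombos row available hnd 2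
      have h4 := countP_pvCombos row available hnd 3
      rw [if_neg hmem] at h3 h4
      rw [show ((3:Int).toNat) = 2 + 1 from rfl, show ((4:Int).toNat) = 3 + 1 from rfl, h3, h4]
      simp

-- ===== VERDICT (by name: the statement is the Claim_ definition above) =====
theorem count_group_options_spec : Claim_equal_count_group_options := by
  intro board row col _ _
  exact count_group_options_spec_aux board row col
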